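-- pv_equiv track=rewrite | github.com/ravenoak/autoresearch | src/autoresearch/search/cache.py | _canonical_storage_hints
-- ===== SOURCE A (Python) =====
-- from collections.abc import Sequence
--
-- _DEFAULT_STORAGE_HINT = "none"
--
-- def _canonical_storage_hints(storage_hints: Sequence[str] | None) -> tuple[str, ...]:
--     """Return a sorted, de-duplicated tuple of storage hints or a placeholder."""
--
--     if not storage_hints:
--         return (_DEFAULT_STORAGE_HINT,)
--
--     seen: list[str] = []
--     for hint in storage_hints:
--         if hint not in seen:
--             seen.append(hint)
--     return tuple(sorted(seen))
-- ===== SOURCE B (Python) =====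
-- from collections.abc import Sequence
--
-- _DEFAULT_STORAGE_HINT = "none"
--
-- def _canonical_storage_hints(storage_hints: Sequence[str] | None) -> tuple[str, ...]:
--     """Sort first, then skip over runs of equal elements with a two-pointer scan."""
--     if not storage_hints:
--         return (_DEFAULT_STORAGE_HINT,)
--     ordered = sorted(storage_hints)
--     n = len(ordered)
--     result: list[str] = []
--     i = 0
--     while i < n:
--         result.append(ordered[i])
--         j = i + 1
--         while j < n and ordered[j] == ordered[i]:
--             j += 1
--         i = j
--     return tuple(result)
-- ===== Notes on version B (the rewrite author's own statement) =====
-- stated objective: alternative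
-- what changed: A dedups by scanning a growing 'seen' list for each hint (quadratic) and sorts afterwards; B sorts first and then emits one representative per run of equal elements with a two-pointer skip scan.
import Mathlib
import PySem

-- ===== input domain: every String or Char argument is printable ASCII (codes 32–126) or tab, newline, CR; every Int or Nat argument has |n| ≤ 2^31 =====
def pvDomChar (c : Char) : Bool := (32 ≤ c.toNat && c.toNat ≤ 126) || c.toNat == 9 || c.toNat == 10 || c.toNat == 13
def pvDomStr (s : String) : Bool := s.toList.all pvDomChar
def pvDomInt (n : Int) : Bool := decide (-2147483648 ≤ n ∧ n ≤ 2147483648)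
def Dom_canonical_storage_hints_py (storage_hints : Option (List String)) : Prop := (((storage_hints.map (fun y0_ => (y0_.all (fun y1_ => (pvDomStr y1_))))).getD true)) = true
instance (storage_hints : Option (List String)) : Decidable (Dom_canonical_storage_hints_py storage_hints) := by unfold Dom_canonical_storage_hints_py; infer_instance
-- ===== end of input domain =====

-- B sorts first and then emits one representative per run of equal elements
-- (two-pointer skip scan), instead of A's dedup-by-scanning-a-seen-list then
-- sort; return values proved equal.

-- ===== PORT A =====
def canonical_storage_hints_py (storage_hints : Option (List String)) : List String :=
  match storage_hints with
  | none => ["none"]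
  | some xs =>
    if xs = [] then ["none"]
    else
      -- seen = []; for hint in storage_hints: if hint not in seen: seen.append(hint)
      let seen := xs.foldl (fun seen hint => if hint ∈ seen then seen else seen ++ [hint]) []
      PySem.List.sorted seen (fun x => x) false

-- ===== PORT B =====
-- outer while loop of Source B: emit ordered[i], then the inner while loop advances
-- j past the run of elements equal to ordered[i] (= dropWhile on the tail)
def pvSkipRuns (ordered : List String) : List String :=
  match ordered with
  | [] => []
  | x :: rest => x :: pvSkipRuns (rest.dropWhile (fun y => y == x))
termination_by ordered.length
decreasing_by
  have := List.length_dropWhile_le (fun y => y == x) rest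
  simp only [List.length_cons]; omega

def canonical_storage_hints_py_alt (storage_hints : Option (List String)) : List String :=
  match storage_hints with
  | none => ["none"]
  | some xs =>
    if xs = [] then ["none"]
    else pvSkipRuns (PySem.List.sorted xs (fun x => x) false)

-- ===== PRECONDITION & SPEC =====
def Spec_canonical_storage_hints_py (storage_hints : Option (List String)) (out : List String) : Prop := out = canonical_storage_hints_py_alt storage_hints
instance (storage_hints : Option (List String)) (out : List String) : Decidable (Spec_canonical_storage_hints_py storage_hints out) := by unfold Spec_canonical_storage_hints_py; infer_instance

-- ===== CLAIM (what is proved, stated in full; the proofs are below) =====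
def Claim_equal_canonical_storage_hints_py : Prop := ∀ (storage_hints : Option (List String)), Dom_canonical_storage_hints_py storage_hints → Spec_canonical_storage_hints_py storage_hints (canonical_storage_hints_py storage_hints)

-- ===== LEMMAS AND PROOFS =====

-- Membership is preserved by the skip-runs scan (dropped elements equal the kept head).
theorem pv_mem_skipRuns (l : List String) : ∀ a, a ∈ pvSkipRuns l ↔ a ∈ l := by
  induction l using pvSkipRuns.induct with
  | case1 => intro a; simp [pvSkipRuns]
  | case2 x rest ih =>
    intro a
    rw [pvSkipRuns]
    simp only [List.mem_cons, ih a]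
    constructor
    · rintro (rfl | h)
      · exact Or.inl rfl
      · exact Or.inr ((List.dropWhile_sublist _).subset h)
    · rintro (rfl | h)
      · exact Or.inl rfl
      · by_cases hax : a = x
        · exact Or.inl hax
        · refine Or.inr ?_
          rcases (List.takeWhile_append_dropWhile (p := fun y => y == x) (l := rest)) ▸ h with h'
          rcases List.mem_append.mp h' with h1 | h1
          · exact absurd (by simpa using List.mem_takeWhile_imp h1) hax
          · exact h1

-- In a Pairwise-(≤) list whose members are all ≥ x, no copy of x survives dropWhile (== x).
theorem pv_not_mem_dropWhile (l : List String) (x : String)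
    (hp : l.Pairwise (· ≤ ·)) (hge : ∀ b ∈ l, x ≤ b) :
    x ∉ l.dropWhile (fun y => y == x) := by
  induction l with
  | nil => simp
  | cons c t ih =>
    by_cases hc : c = x
    · rw [List.dropWhile_cons_of_pos (by simp [hc])]
      exact ih (List.pairwise_cons.mp hp).2 (fun b hb => hge b (List.mem_cons_of_mem _ hb))
    · rw [List.dropWhile_cons_of_neg (by simp [hc])]
      intro hmem
      rcases List.mem_cons.mp hmem with rfl | hxt
      · exact hc rfl
      · have h1 : c ≤ x := (List.pairwise_cons.mp hp).1 x hxt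
        have h2 : x ≤ c := hge c List.mem_cons_self
        exact hc (le_antisymm h1 h2)

-- On a Pairwise-(≤) input, the skip-runs scan yields a Pairwise-(≤) Nodup list.
theorem pv_skipRuns_sorted_nodup (l : List String) (hp : l.Pairwise (· ≤ ·)) :
    (pvSkipRuns l).Pairwise (· ≤ ·) ∧ (pvSkipRuns l).Nodup := by
  induction l using pvSkipRuns.induct with
  | case1 => simp [pvSkipRuns]
  | case2 x rest ih =>
    have hxr : ∀ b ∈ rest, x ≤ b := (List.pairwise_cons.mp hp).1
    have hpr : rest.Pairwise (· ≤ ·) := (List.pairwise_cons.mp hp).2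
    have hpd : (rest.dropWhile (fun y => y == x)).Pairwise (· ≤ ·) :=
      hpr.sublist (List.dropWhile_sublist _)
    obtain ⟨ih1, ih2⟩ := ih hpd
    rw [pvSkipRuns]
    constructor
    · rw [List.pairwise_cons]
      refine ⟨fun b hb => ?_, ih1⟩
      exact hxr b ((List.dropWhile_sublist _).subset ((pv_mem_skipRuns _ b).mp hb))
    · rw [List.nodup_cons]
      refine ⟨fun hmem => ?_, ih2⟩
      exact pv_not_mem_dropWhile rest x hpr hxr ((pv_mem_skipRuns _ x).mp hmem)

-- A's 'hint not in seen' fold is exactly PySem.Set.ofList.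
theorem pv_seen_eq_ofList (xs : List String) :
    xs.foldl (fun seen hint => if hint ∈ seen then seen else seen ++ [hint]) [] = PySem.Set.ofList xs := by
  rw [PySem.Set.ofList_eq_foldl]
  refine PySem.List.foldl_congr_mem _ _ _ _ (fun acc x _ => ?_)
  simp only [PySem.Set.add, PySem.Set.contains]
  by_cases h : x ∈ acc
  · simp [h]
  · simp [h]

-- ===== VERDICT (by name: the statement is the Claim_ definition above) =====
theorem canonical_storage_hints_py_spec : Claim_equal_canonical_storage_hints_py := by
  intro storage_hints _
  unfold Spec_canonical_storage_hints_py canonical_storage_hints_py canonical_storage_hints_py_alt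
  match storage_hints with
  | none => rfl
  | some xs =>
    by_cases hxs : xs = []
    · simp [hxs]
    · simp only [if_neg hxs]
      rw [pv_seen_eq_ofList]
      have hA1 : (PySem.List.sorted (PySem.Set.ofList xs) (fun x => x) false).Pairwise (· ≤ ·) :=
        PySem.List.sorted_pairwise _ _
      have hA2 : (PySem.List.sorted (PySem.Set.ofList xs) (fun x => x) false).Nodup :=
        (PySem.List.sorted_perm _ _ _).nodup_iff.mpr (PySem.Set.nodup_ofList xs)
      have hs : (PySem.List.sorted xs (fun x => x) false).Pairwise (· ≤ ·) :=
        PySem.List.sorted_pairwise _ _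
      obtain ⟨hB1, hB2⟩ := pv_skipRuns_sorted_nodup (PySem.List.sorted xs (fun x => x) false) hs
      refine PySem.List.eq_of_perm_of_pairwise_le_of_injective (fun x => x)
        (fun _ _ h => h) ?_ hA1 hB1
      rw [List.perm_ext_iff_of_nodup hA2 hB2]
      intro a
      rw [pv_mem_skipRuns _ a]
      have h1 : a ∈ PySem.List.sorted (PySem.Set.ofList xs) (fun x => x) false ↔ a ∈ PySem.Set.ofList xs :=
        (PySem.List.sorted_perm _ _ _).mem_iff
      have h2 : a ∈ PySem.List.sorted xs (fun x => x) false ↔ a ∈ xs :=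
        (PySem.List.sorted_perm _ _ _).mem_iff
      rw [h1, h2, PySem.Set.mem_ofList]
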